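-- pv_equiv track=rewrite | github.com/tommasorezzi/AI-Intensity | functions/core_nlp.py | count_ai_intensity
-- ===== SOURCE A (Python) =====
-- from typing import Dict, List, Optional, Tuple
--
-- def count_ai_intensity(tokens: List[str], keyword_index: Dict[str, List[List[str]]]) -> Tuple[int, Dict[str, int]]:
--     """Count non-overlapping keyword matches in a token stream.
--
--     The algorithm scans tokens left-to-right. Whenever the current token is a
--     possible start of any keyword (per ``keyword_index``), we attempt matches in
--     longest-first order. On a match, we increment the total score, update per-
--     keyword counts, mark the matched token span as used so no overlaps can occur,
--     advance the pointer by the length of the match, and continue.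
--
--     Parameters
--     ----------
--     tokens: List[str]
--         Normalized tokens of the source text.
--     keyword_index: Dict[str, List[List[str]]]
--         Prepared keyword index from :func:`prepare_keywords`.
--
--     Returns
--     -------
--     Tuple[int, Dict[str, int]]
--         A pair of (total_score, per_keyword_counts). The per-keyword dictionary
--         uses the normalized phrase (space-joined tokens) as the key.
--     """
--
--     n = len(tokens)
--     if n == 0:
--         return 0, {}
--
--     used = [False] * n
--     total_score = 0
--     per_keyword: Dict[str, int] = {}
--
--     i = 0
--     while i < n:
--         if used[i]:
--             i += 1
--             continue
--
--         start = tokens[i]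
--         candidates = keyword_index.get(start)
--         matched = False
--
--         if candidates:
--             for cand in candidates:
--                 L = len(cand)
--                 if i + L <= n and tokens[i : i + L] == cand and all(not used[j] for j in range(i, i + L)):
--                     total_score += 1
--                     phrase = " ".join(cand)
--                     per_keyword[phrase] = per_keyword.get(phrase, 0) + 1
--                     for j in range(i, i + L):
--                         used[j] = True
--                     i += L
--                     matched = True
--                     break
--
--         if not matched:
--             i += 1
--
--     return total_score, per_keyword
-- ===== SOURCE B (Python) =====
-- from typing import Dict, List, Tuple
--
-- def count_ai_intensity(tokens: List[str], keyword_index: Dict[str, List[List[str]]]) -> Tuple[int, Dict[str, int]]: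
--     """Suffix-walk re-implementation: at each step consume either the first
--     matching keyword phrase starting here or a single token.  No ``used``
--     array is kept: the scan never revisits a consumed position, so the
--     bookkeeping A maintains is redundant."""
--     total = 0
--     per: Dict[str, int] = {}
--     rest = tokens
--     while rest:
--         hit = next((c for c in keyword_index.get(rest[0], ())
--                     if rest[:len(c)] == c), None)
--         if hit is None:
--             rest = rest[1:]
--         else:
--             total += 1
--             phrase = " ".join(hit)
--             per[phrase] = per.get(phrase, 0) + 1
--             rest = rest[len(hit):]
--     return total, per
-- ===== Notes on version B (the rewrite author's own statement) =====
-- stated objective: simpler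
-- what changed: B walks the token suffix directly, consuming either the first matching keyword phrase or one token per step, dropping A's used-array, its per-candidate all()-unused scan and its explicit bounds check, which are provably redundant because the scan never revisits a consumed position.
import Mathlib
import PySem

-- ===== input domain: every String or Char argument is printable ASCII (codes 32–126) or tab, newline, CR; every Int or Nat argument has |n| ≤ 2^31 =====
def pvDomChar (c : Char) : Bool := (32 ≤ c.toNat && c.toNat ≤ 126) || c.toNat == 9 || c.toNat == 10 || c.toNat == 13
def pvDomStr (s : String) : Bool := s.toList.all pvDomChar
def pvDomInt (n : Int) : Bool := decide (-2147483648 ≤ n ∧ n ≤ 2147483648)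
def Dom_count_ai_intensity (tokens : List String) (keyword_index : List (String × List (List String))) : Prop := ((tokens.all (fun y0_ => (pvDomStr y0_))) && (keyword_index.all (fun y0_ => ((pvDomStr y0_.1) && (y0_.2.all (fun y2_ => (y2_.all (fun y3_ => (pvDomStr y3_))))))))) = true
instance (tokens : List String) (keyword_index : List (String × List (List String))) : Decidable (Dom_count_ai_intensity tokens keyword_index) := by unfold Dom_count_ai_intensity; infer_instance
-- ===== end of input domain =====

-- B drops A's redundant `used`-array bookkeeping and walks the token suffix directly; objective: simpler.

-- ===== PORT A =====
-- A's `for cand in candidates:` scan, returning the first candidate that fits in the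
-- stream, matches the slice tokens[i:i+L], and whose whole span is unused.
-- (`tokens[i:i+L]` with 0 ≤ i is exactly (tokens.drop i).take L.)
def pvAFind (tokens : List String) (used : List Bool) (n i : Nat) :
    List (List String) → Option (List String)
  | [] => none
  | cand :: rest =>
    if i + cand.length ≤ n ∧ (tokens.drop i).take cand.length = cand
        ∧ ((List.range cand.length).all fun j => !(used.getD (i + j) false))
    then some cand else pvAFind tokens used n i rest

-- `for j in range(i, i+L): used[j] = True`
def pvMarkUsed (used : List Bool) (i L : Nat) : List Bool :=
  (List.range L).foldl (fun u j => u.set (i + j) true) used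

-- A's `while i < n:` loop; fuel bounds the iteration count (on terminating inputs i strictly
-- increases each iteration, so fuel = n is enough; the fuel-0 fallback returns the
-- same pair the exit branch returns).  `keyword_index.get(start)` followed by
-- `if candidates:` + for-loop scans nothing for both a missing key and an empty
-- list, which is exactly `getD … []`.  `phrase = " ".join(cand)` is inlined.
def pvALoop (tokens : List String) (kw : List (String × List (List String))) (n : Nat) :
    Nat → Nat → List Bool → Int → PySem.Dict String Int → Int × (List (String × Int))
  | 0, _, _, total, per => (total, per.items)
  | fuel + 1, i, used, total, per =>
    if i < n then
      if used.getD i false then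
        pvALoop tokens kw n fuel (i + 1) used total per
      else
        match pvAFind tokens used n i ((PySem.Dict.mk kw).getD (tokens.getD i "") []) with
        | some cand =>
          pvALoop tokens kw n fuel (i + cand.length) (pvMarkUsed used i cand.length)
            (total + 1)
            (per.insert (PySem.Str.join " " cand)
              (per.getD (PySem.Str.join " " cand) 0 + 1))
        | none => pvALoop tokens kw n fuel (i + 1) used total per
    else (total, per.items)

-- n = len(tokens)
def count_ai_intensity (tokens : List String) (keyword_index : List (String × List (List String))) : Int × (List (String × Int)) :=
  if tokens.length = 0 then (0, [])
  else pvALoop tokens keyword_index tokens.length tokens.length 0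
    (List.replicate tokens.length false) 0 PySem.Dict.empty

-- ===== PORT B =====
-- B's `next((c for c in … if rest[:len(c)] == c), None)`; rest[:L] is rest.take L.
def pvBFind (rest : List String) : List (List String) → Option (List String)
  | [] => none
  | c :: cs => if rest.take c.length = c then some c else pvBFind rest cs

-- B's `while rest:` suffix walk; fuel = len(tokens) bounds the iterations (each
-- step shortens a nonempty rest when every matched phrase is nonempty); `phrase = " ".join(hit)` is inlined.
def pvBLoop (kw : List (String × List (List String))) :
    Nat → List String → Int → PySem.Dict String Int → Int × (List (String × Int))
  | 0, _, total, per => (total, per.items)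
  | fuel + 1, rest, total, per =>
    match rest with
    | [] => (total, per.items)
    | t :: _ =>
      match pvBFind rest ((PySem.Dict.mk kw).getD t []) with
      | none => pvBLoop kw fuel rest.tail total per
      | some hit =>
        pvBLoop kw fuel (rest.drop hit.length) (total + 1)
          (per.insert (PySem.Str.join " " hit)
            (per.getD (PySem.Str.join " " hit) 0 + 1))

def count_ai_intensity_alt (tokens : List String) (keyword_index : List (String × List (List String))) : Int × (List (String × Int)) :=
  pvBLoop keyword_index tokens.length tokens 0 PySem.Dict.empty

-- ===== PRECONDITION & SPEC =====
def Spec_count_ai_intensity (tokens : List String) (keyword_index : List (String × List (List String))) (out : Int × (List (String × Int))) : Prop := out = count_ai_intensity_alt tokens keyword_index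
instance (tokens : List String) (keyword_index : List (String × List (List String))) (out : Int × (List (String × Int))) : Decidable (Spec_count_ai_intensity tokens keyword_index out) := by unfold Spec_count_ai_intensity; infer_instance

-- ===== CLAIM (what is proved, stated in full; the proofs are below) =====
def Claim_equal_count_ai_intensity : Prop := ∀ (tokens : List String) (keyword_index : List (String × List (List String))), Dom_count_ai_intensity tokens keyword_index → Spec_count_ai_intensity tokens keyword_index (count_ai_intensity tokens keyword_index)

-- ===== LEMMAS AND PROOFS =====

-- marking the span [i, i+L) leaves the slots ≥ i + L untouched
lemma pvGetD_markUsed_ge (used : List Bool) (i L j : Nat) (h : i + L ≤ j) :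
    (pvMarkUsed used i L).getD j false = used.getD j false := by
  induction L with
  | zero => simp [pvMarkUsed]
  | succ L ih =>
    have hstep : pvMarkUsed used i (L + 1) = (pvMarkUsed used i L).set (i + L) true := by
      simp [pvMarkUsed, List.range_succ]
    have hne : i + L ≠ j := by omega
    rw [hstep, List.getD_eq_getElem?_getD, List.getElem?_set_ne hne,
      ← List.getD_eq_getElem?_getD]
    exact ih (by omega)

lemma pvLength_markUsed (used : List Bool) (i L : Nat) :
    (pvMarkUsed used i L).length = used.length := by
  induction L with
  | zero => simp [pvMarkUsed]
  | succ L ih =>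
    have hstep : pvMarkUsed used i (L + 1) = (pvMarkUsed used i L).set (i + L) true := by
      simp [pvMarkUsed, List.range_succ]
    rw [hstep, List.length_set]; exact ih

lemma pvBFind_sound (rest : List String) (cs : List (List String)) (c : List String)
    (h : pvBFind rest cs = some c) : rest.take c.length = c := by
  induction cs with
  | nil => simp [pvBFind] at h
  | cons d ds ih =>
    by_cases hd : rest.take d.length = d
    · simp [pvBFind, hd] at h; subst h; exact hd
    · simp [pvBFind, hd] at h; exact ih h

-- when every slot ≥ i is unused and i ≤ n, A's candidate scan equals B's
lemma pvFind_eq (tokens : List String) (used : List Bool) (i : Nat)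
    (hi : i ≤ tokens.length)
    (hinv : ∀ j, i ≤ j → used.getD j false = false) :
    ∀ cs, pvAFind tokens used tokens.length i cs = pvBFind (tokens.drop i) cs := by
  intro cs
  induction cs with
  | nil => rfl
  | cons c rest ih =>
    unfold pvAFind pvBFind
    by_cases htake : (tokens.drop i).take c.length = c
    · have h1 := congrArg List.length htake
      simp only [List.length_take, List.length_drop] at h1
      have hfit : i + c.length ≤ tokens.length := by omega
      have hall : ((List.range c.length).all fun j => !(used.getD (i + j) false)) = true := by
        simp only [List.all_eq_true, List.mem_range, Bool.not_eq_true']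
        exact fun j _ => hinv (i + j) (by omega)
      rw [if_pos ⟨hfit, htake, by exact_mod_cast hall⟩, if_pos htake]
    · rw [if_neg (fun hc => htake hc.2.1), if_neg htake]
      exact ih

-- the main loop correspondence: A at index i with an all-unused tail equals B on the suffix
lemma pvLoop_eq (tokens : List String) (kw : List (String × List (List String))) :
    ∀ (fuel i : Nat) (used : List Bool) (total : Int) (per : PySem.Dict String Int),
      used.length = tokens.length → i ≤ tokens.length →
      (∀ j, i ≤ j → used.getD j false = false) →
      pvALoop tokens kw tokens.length fuel i used total per
        = pvBLoop kw fuel (tokens.drop i) total per := by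
  intro fuel
  induction fuel with
  | zero => intro i used total per _ _ _; rfl
  | succ fuel ih =>
    intro i used total per hlen hi hinv
    by_cases hlt : i < tokens.length
    · have hdrop : tokens.drop i = tokens[i] :: tokens.drop (i + 1) :=
        List.drop_eq_getElem_cons hlt
      have hused : used.getD i false = false := hinv i (le_refl i)
      have hgetD : tokens.getD i "" = tokens[i] := List.getD_eq_getElem tokens "" (by omega)
      have hfind := pvFind_eq tokens used i (by omega) hinv
        ((PySem.Dict.mk kw).getD tokens[i] [])
      rw [pvALoop, if_pos hlt, hused, if_neg (by simp), hgetD, hfind, hdrop, pvBLoop]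
      cases hB : pvBFind (tokens[i] :: tokens.drop (i + 1))
          ((PySem.Dict.mk kw).getD tokens[i] []) with
      | none =>
        simp only [List.tail_cons]
        exact ih (i + 1) used total per hlen (by omega) (fun j hj => hinv j (by omega))
      | some hit =>
        dsimp only
        have htake : (tokens.drop i).take hit.length = hit := by
          rw [hdrop]; exact pvBFind_sound _ _ _ hB
        have h1 := congrArg List.length htake
        simp only [List.length_take, List.length_drop] at h1
        have hfit : i + hit.length ≤ tokens.length := by omega
        have hrec := ih (i + hit.length) (pvMarkUsed used i hit.length) (total + 1)
          (per.insert (PySem.Str.join " " hit) (per.getD (PySem.Str.join " " hit) 0 + 1))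
          (by rw [pvLength_markUsed]; exact hlen) hfit
          (fun j hj => by
            rw [pvGetD_markUsed_ge used i hit.length j hj]
            exact hinv j (by omega))
        rw [hrec, ← hdrop, List.drop_drop]
    · have hnil : tokens.drop i = [] := by
        have : i = tokens.length := by omega
        simp [this]
      rw [pvALoop, if_neg hlt, hnil, pvBLoop]

-- ===== VERDICT (by name: the statement is the Claim_ definition above) =====
theorem count_ai_intensity_spec : Claim_equal_count_ai_intensity := by
  intro tokens keyword_index _
  unfold Spec_count_ai_intensity count_ai_intensity count_ai_intensity_alt
  by_cases h : tokens.length = 0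
  · have : tokens = [] := List.eq_nil_of_length_eq_zero h
    subst this
    rfl
  · rw [if_neg h]
    have := pvLoop_eq tokens keyword_index tokens.length 0
      (List.replicate tokens.length false) 0 PySem.Dict.empty
      (by simp) (by omega)
      (fun j _ => by
        rw [List.getD_eq_getElem?_getD, List.getElem?_replicate]
        split <;> rfl)
    simpa using this
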